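-- pv_equiv track=rewrite | github.com/shyd401-dotcom/python-automation-practice | even_odd_checker.py/even_odd_checker.py | analyze_range
-- ===== SOURCE A (Python) =====
-- def is_even(n: int) -> bool:
--     return n % 2 == 0
--
-- def analyze_range(start: int, end: int) -> dict:
--     """Return a summary of even/odd counts for the inclusive range.
--
--     If `start` > `end` the range is still processed by swapping the values.
--     The returned dictionary has the keys ``'even'`` and ``'odd'`` with
--     integer counts.
--     """
--     # ensure the range works in either direction
--     if start > end:
--         start, end = end, start
--
--     even_count = 0
--     odd_count = 0
--     for n in range(start, end + 1):
--         if is_even(n):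
--             even_count += 1
--         else:
--             odd_count += 1
--     return {"even": even_count, "odd": odd_count}
-- ===== SOURCE B (Python) =====
-- def analyze_range(start: int, end: int) -> dict:
--     """Closed-form even/odd counts for the inclusive range (O(1))."""
--     if start > end:
--         start, end = end, start
--     total = end - start + 1
--     even = end // 2 - (start - 1) // 2
--     return {"even": even, "odd": total - even}
-- ===== Notes on version B (the rewrite author's own statement) =====
-- stated objective: faster
-- what changed: replaces the per-element loop over range(start, end+1) with closed-form arithmetic: even = end//2 - (start-1)//2, odd = total - even
import Mathlib
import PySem

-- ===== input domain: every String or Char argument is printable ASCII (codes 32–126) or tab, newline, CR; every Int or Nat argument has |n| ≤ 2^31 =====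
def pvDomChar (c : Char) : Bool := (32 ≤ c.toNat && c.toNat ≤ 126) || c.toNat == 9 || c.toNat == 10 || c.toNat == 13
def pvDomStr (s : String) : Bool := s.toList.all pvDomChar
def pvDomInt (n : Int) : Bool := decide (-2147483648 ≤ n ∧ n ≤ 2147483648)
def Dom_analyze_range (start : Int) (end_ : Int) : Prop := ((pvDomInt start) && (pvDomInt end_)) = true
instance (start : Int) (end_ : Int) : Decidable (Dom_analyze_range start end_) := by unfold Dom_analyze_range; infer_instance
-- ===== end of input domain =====

-- B replaces A's per-element loop with closed-form arithmetic (even = end//2 - (start-1)//2); objective: faster.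
-- ===== PORT A =====
def is_even (n : Int) : Bool := PySem.Int.mod n 2 == 0

def analyze_range (start : Int) (end_ : Int) : List (String × Int) :=
  let p := if start > end_ then (end_, start) else (start, end_)
  let s := p.1
  let e := p.2
  let counts := (PySem.List.pyRange s (e + 1) 1).foldl
    (fun (acc : Int × Int) n => if is_even n then (acc.1 + 1, acc.2) else (acc.1, acc.2 + 1))
    (0, 0)
  [("even", counts.1), ("odd", counts.2)]

-- ===== PORT B =====
def analyze_range_alt (start : Int) (end_ : Int) : List (String × Int) :=
  let p := if start > end_ then (end_, start) else (start, end_)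
  let s := p.1
  let e := p.2
  let total := e - s + 1
  let even := PySem.Int.floordiv e 2 - PySem.Int.floordiv (s - 1) 2
  [("even", even), ("odd", total - even)]

-- ===== PRECONDITION & SPEC =====
def Spec_analyze_range (start : Int) (end_ : Int) (out : List (String × Int)) : Prop := out = analyze_range_alt start end_
instance (start : Int) (end_ : Int) (out : List (String × Int)) : Decidable (Spec_analyze_range start end_ out) := by unfold Spec_analyze_range; infer_instance

-- ===== CLAIM (what is proved, stated in full; the proofs are below) =====
def Claim_equal_analyze_range : Prop := ∀ (start : Int) (end_ : Int), Dom_analyze_range start end_ → Spec_analyze_range start end_ (analyze_range start end_)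

-- ===== LEMMAS AND PROOFS =====

-- ===== VERDICT (by name: the statement is the Claim_ definition above) =====
-- the loop's running counts in closed form
lemma count_loop (s b : Int) (e o : Int) (h : s ≤ b) :
    (PySem.List.pyRange s b 1).foldl
      (fun (acc : Int × Int) n => if is_even n then (acc.1 + 1, acc.2) else (acc.1, acc.2 + 1))
      (e, o)
    = (e + (PySem.Int.floordiv (b - 1) 2 - PySem.Int.floordiv (s - 1) 2),
       o + ((b - s) - (PySem.Int.floordiv (b - 1) 2 - PySem.Int.floordiv (s - 1) 2))) := by
  have hb : ∃ k : Nat, b = s + k := ⟨(b - s).toNat, by omega⟩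
  obtain ⟨k, rfl⟩ := hb
  clear h
  induction k generalizing e o with
  | zero =>
    simp [PySem.List.pyRange]
  | succ k ih =>
    have hle : s ≤ s + k := by omega
    have : (s + (k + 1 : Nat) : Int) = (s + k) + 1 := by push_cast; ring
    rw [this, PySem.List.pyRange_one_succ_right hle, List.foldl_append, ih]
    simp only [List.foldl_cons, List.foldl_nil, is_even]
    have h2 : (0:Int) < 2 := by omega
    rw [PySem.Int.mod_eq_emod_of_pos h2,
        PySem.Int.floordiv_eq_ediv_of_pos h2, PySem.Int.floordiv_eq_ediv_of_pos h2,
        PySem.Int.floordiv_eq_ediv_of_pos h2]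
    by_cases hpar : (s + (k:Int)) % 2 = 0 <;> simp [hpar] <;> constructor <;> omega

theorem analyze_range_spec : Claim_equal_analyze_range := by
  intro start end_ _
  unfold Spec_analyze_range analyze_range analyze_range_alt
  by_cases h : start > end_ <;> simp only [h, if_true, if_false]
  · rw [count_loop _ _ _ _ (by omega : end_ ≤ start + 1)]
    have : start + 1 - 1 = start := by ring
    rw [this]
    simp only [Prod.mk.injEq, List.cons.injEq, and_true]
    exact ⟨⟨trivial, by ring⟩, ⟨trivial, by ring⟩⟩
  · rw [count_loop _ _ _ _ (by omega : start ≤ end_ + 1)]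
    have : end_ + 1 - 1 = end_ := by ring
    rw [this]
    simp only [Prod.mk.injEq, List.cons.injEq, and_true]
    exact ⟨⟨trivial, by ring⟩, ⟨trivial, by ring⟩⟩
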